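-- pv_equiv track=rewrite | github.com/irene622/backjun | 18870compress_coordinate.py | comp_coordinates
-- ===== SOURCE A (Python) =====
-- def make_num_dict(num_list) :
--     distinct_dict = {}
--     for i in set(num_list) :
--         distinct_dict[i] = 0
--     return distinct_dict
--
-- def comp_coordinates(num_num, num_list) :
--     dist_dict = make_num_dict(num_list)
--     num = len(set(num_list))
--     dist_num_list = list(set(num_list))
--
--     for i in range(num) :
--         for side_idx in range(i+1, num) :
--             if dist_num_list[i] < dist_num_list[side_idx] :
--                 dist_dict[dist_num_list[side_idx]] += 1
--             elif dist_num_list[i] == dist_num_list[side_idx] :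
--                 continue
--             else :
--                 dist_dict[dist_num_list[i]] += 1
--     return dist_dict
-- ===== SOURCE B (Python) =====
-- def comp_coordinates(num_num, num_list):
--     rank = {v: i for i, v in enumerate(sorted(set(num_list)))}
--     return {v: rank[v] for v in dict.fromkeys(num_list)}
-- ===== Notes on version B (the rewrite author's own statement) =====
-- stated objective: faster
-- what changed: B replaces A's all-pairs comparison of the distinct values by sorting them once and reading each value's rank (count of smaller distinct values) off its index in the sorted list.
import Mathlib
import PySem

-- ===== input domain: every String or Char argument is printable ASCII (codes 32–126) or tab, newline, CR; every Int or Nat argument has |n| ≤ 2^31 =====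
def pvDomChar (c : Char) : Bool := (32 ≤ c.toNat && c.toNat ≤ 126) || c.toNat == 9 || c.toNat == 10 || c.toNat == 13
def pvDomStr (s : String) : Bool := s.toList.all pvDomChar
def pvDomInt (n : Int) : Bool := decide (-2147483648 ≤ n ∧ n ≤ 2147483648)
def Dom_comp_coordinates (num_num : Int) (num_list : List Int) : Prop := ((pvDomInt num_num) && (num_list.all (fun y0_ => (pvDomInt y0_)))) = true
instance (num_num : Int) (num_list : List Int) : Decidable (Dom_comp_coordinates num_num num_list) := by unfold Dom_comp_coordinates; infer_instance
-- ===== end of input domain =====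

-- B replaces A's O(n^2) all-pairs comparison of distinct values by sorting the distinct
-- values once: the rank (count of smaller distinct values) of each value is its index in
-- the sorted list (faster: O(n^2) → O(n log n) on the distinct values).
-- Both Pythons return a dict; dict outputs are compared ignoring key order.

-- ===== PORT A =====
def make_num_dict (num_list : List Int) : PySem.Dict Int Int :=
  (PySem.Set.ofList num_list).foldl (fun d i => d.insert i 0) PySem.Dict.empty

def comp_coordinates (num_num : Int) (num_list : List Int) : List (Int × Int) :=
  let dist_dict := make_num_dict num_list
  let num : Int := ((PySem.Set.ofList num_list).length : Int)
  let dist_num_list : List Int := PySem.Set.ofList num_list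
  -- dist_num_list[i] is always in range, so pyGetD is exact; dist_dict[k] += 1 always
  -- hits an existing key (k ∈ dist_num_list), so Dict.modify with default 0 is exact.
  let final := (PySem.List.pyRange 0 num).foldl (fun d i =>
      (PySem.List.pyRange (i+1) num).foldl (fun d side_idx =>
        if PySem.List.pyGetD dist_num_list i 0 < PySem.List.pyGetD dist_num_list side_idx 0 then
          d.modify (PySem.List.pyGetD dist_num_list side_idx 0) 0 (· + 1)
        else if PySem.List.pyGetD dist_num_list i 0 = PySem.List.pyGetD dist_num_list side_idx 0 then
          d
        else
          d.modify (PySem.List.pyGetD dist_num_list i 0) 0 (· + 1)) d) dist_dict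
  final.items

-- ===== PORT B =====
def comp_coordinates_alt (num_num : Int) (num_list : List Int) : List (Int × Int) :=
  let s := PySem.List.sorted (PySem.Set.ofList num_list) (fun x => x)
  -- rank[v] always hits an existing key (every v of num_list is in s), so getD 0 is exact
  let rank : PySem.Dict Int Int :=
    (PySem.List.enumerate s).foldl (fun d p => d.insert p.2 p.1) PySem.Dict.empty
  (PySem.List.dedup num_list).map (fun v => (v, rank.getD v 0))

-- ===== PRECONDITION & SPEC =====
def Spec_comp_coordinates (num_num : Int) (num_list : List Int) (out : List (Int × Int)) : Prop := out = comp_coordinates_alt num_num num_list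
instance (num_num : Int) (num_list : List Int) (out : List (Int × Int)) : Decidable (Spec_comp_coordinates num_num num_list out) := by unfold Spec_comp_coordinates; infer_instance

-- ===== CLAIM (what is proved, stated in full; the proofs are below) =====
def Claim_equal_comp_coordinates : Prop := ∀ (num_num : Int) (num_list : List Int), Dom_comp_coordinates num_num num_list → Spec_comp_coordinates num_num num_list (comp_coordinates num_num num_list)

-- ===== LEMMAS AND PROOFS =====

-- the key A's inner body increments for a pair of distinct values
def keyOf (x y : Int) : Int := if x < y then y else x

-- A's nested index loops, reformulated structurally on the list of distinct values
def pairsFold (t : List Int) (d : PySem.Dict Int Int) : PySem.Dict Int Int :=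
  match t with
  | [] => d
  | x :: u => pairsFold u (u.foldl (fun d y => d.modify (keyOf x y) 0 (· + 1)) d)

-- a dict over the key list ds with value function f
def dictOf (ds : List Int) (f : Int → Int) : PySem.Dict Int Int := ⟨ds.map (fun v => (v, f v))⟩

-- total increment the pair loop applies to key v
def inc : List Int → Int → Int
  | [], _ => 0
  | x :: u, v => (u.countP (fun y => keyOf x y = v) : Int) + inc u v

theorem dictOf_get?_mem (ds : List Int) (f : Int → Int) (v : Int) (hv : v ∈ ds) :
    (dictOf ds f).get? v = some (f v) := by
  induction ds with
  | nil => cases hv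
  | cons x u ih =>
    by_cases hx : v = x
    · subst hx; simp [dictOf, PySem.Dict.get?]
    · have h : v ∈ u := by
        rcases List.mem_cons.mp hv with h | h
        · exact absurd h hx
        · exact h
      have hxv : x ≠ v := Ne.symm hx
      simpa [dictOf, PySem.Dict.get?, hxv] using ih h

theorem dictOf_contains_mem (ds : List Int) (f : Int → Int) (v : Int) (hv : v ∈ ds) :
    (dictOf ds f).contains v = true := by
  induction ds with
  | nil => cases hv
  | cons x u ih =>
    by_cases hx : v = x
    · subst hx; simp [dictOf, PySem.Dict.contains]
    · have h : v ∈ u := by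
        rcases List.mem_cons.mp hv with h | h
        · exact absurd h hx
        · exact h
      have hxv : x ≠ v := Ne.symm hx
      simpa [dictOf, PySem.Dict.contains, hxv] using ih h

theorem dictOf_modify (ds : List Int) (f : Int → Int) (v : Int) (hv : v ∈ ds) :
    (dictOf ds f).modify v 0 (· + 1) = dictOf ds (fun w => if w = v then f w + 1 else f w) := by
  have hget : (dictOf ds f).getD v 0 = f v := by
    simp [PySem.Dict.getD, dictOf_get?_mem ds f v hv]
  simp only [PySem.Dict.modify, hget]
  unfold PySem.Dict.insert
  rw [if_pos (dictOf_contains_mem ds f v hv)]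
  simp only [dictOf, List.map_map, PySem.Dict.mk.injEq]
  refine List.map_congr_left (fun w _ => ?_)
  by_cases hw : w = v <;> simp [hw]

theorem dictOf_congr (ds : List Int) (f g : Int → Int) (h : ∀ v ∈ ds, f v = g v) :
    dictOf ds f = dictOf ds g := by
  simp only [dictOf, PySem.Dict.mk.injEq]
  exact List.map_congr_left (fun v hv => by rw [h v hv])

theorem inner_fold_dictOf (ds : List Int) (x : Int) (u : List Int) (f : Int → Int)
    (hu : ∀ y ∈ u, keyOf x y ∈ ds) :
    u.foldl (fun d y => d.modify (keyOf x y) 0 (· + 1)) (dictOf ds f)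
      = dictOf ds (fun v => f v + (u.countP (fun y => keyOf x y = v) : Int)) := by
  induction u generalizing f with
  | nil => exact dictOf_congr ds f _ (fun v _ => by simp)
  | cons y t ih =>
    have hy : keyOf x y ∈ ds := hu y (by simp)
    rw [List.foldl_cons, dictOf_modify ds f _ hy,
      ih _ (fun z hz => hu z (by simp [hz]))]
    refine dictOf_congr ds _ _ (fun v _ => ?_)
    by_cases hv : keyOf x y = v
    · simp [hv]; push_cast; ring
    · simp [hv, Ne.symm hv]

theorem pairsFold_dictOf (ds : List Int) (t : List Int) (f : Int → Int)
    (ht : ∀ y ∈ t, y ∈ ds) :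
    pairsFold t (dictOf ds f) = dictOf ds (fun v => f v + inc t v) := by
  induction t generalizing f with
  | nil => simpa [pairsFold] using dictOf_congr ds f _ (fun v _ => by simp [inc])
  | cons x u ih =>
    have hkey : ∀ y ∈ u, keyOf x y ∈ ds := fun y hy => by
      by_cases h : x < y
      · simpa [keyOf, h] using ht y (by simp [hy])
      · simpa [keyOf, h] using ht x (by simp)
    rw [pairsFold, inner_fold_dictOf ds x u f hkey, ih _ (fun y hy => ht y (by simp [hy]))]
    refine dictOf_congr ds _ _ (fun v _ => ?_)
    simp [inc]; ring

theorem inc_eq_zero (t : List Int) (v : Int) (hv : v ∉ t) : inc t v = 0 := by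
  induction t with
  | nil => rfl
  | cons x u ih =>
    have hx : v ≠ x := fun h => hv (h ▸ List.mem_cons_self)
    have hu : v ∉ u := fun h => hv (List.mem_cons_of_mem _ h)
    have : u.countP (fun y => decide (keyOf x y = v)) = 0 := by
      rw [List.countP_eq_zero]
      intro y hy
      simp only [decide_eq_true_eq]
      intro hk
      by_cases h : x < y
      · have hyv : y = v := by simpa [keyOf, h] using hk
        exact hu (hyv ▸ hy)
      · have hxv : x = v := by simpa [keyOf, h] using hk
        exact hx hxv.symm
    simp [inc, this, ih hu]

theorem inc_count (t : List Int) (hn : t.Nodup) (v : Int) (hv : v ∈ t) :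
    inc t v = (t.countP (fun y => decide (y < v)) : Int) := by
  induction t with
  | nil => cases hv
  | cons x u ih =>
    rcases List.nodup_cons.mp hn with ⟨hxu, hun⟩
    by_cases hx : v = x
    · subst hx
      have h1 : u.countP (fun y => decide (keyOf v y = v)) = u.countP (fun y => decide (y < v)) := by
        refine List.countP_congr (fun y hy => ?_)
        simp only [decide_eq_true_eq]
        constructor
        · intro hk
          by_cases h : v < y
          · have hyv : y = v := by simpa [keyOf, h] using hk
            exact absurd (hyv ▸ hy) hxu
          · have hne : y ≠ v := fun hyv => hxu (hyv ▸ hy)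
            exact lt_of_le_of_ne (not_lt.mp h) hne
        · intro hlt; simp [keyOf, not_lt.mpr (le_of_lt hlt)]
      simp [inc, h1, inc_eq_zero u v hxu]
    · have hvu : v ∈ u := by
        rcases List.mem_cons.mp hv with h | h
        · exact absurd h hx
        · exact h
      have h1 : u.countP (fun y => decide (keyOf x y = v)) = if x < v then 1 else 0 := by
        have hp : ∀ y ∈ u, (decide (keyOf x y = v)) = (y == v && decide (x < v)) := by
          intro y hy
          by_cases h : x < y
          · by_cases hyv : y = v
            · subst hyv; simp [keyOf, h]
            · simp [keyOf, h, hyv]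
          · have hkx : keyOf x y = x := by simp [keyOf, h]
            by_cases hyv : y = v
            · subst hyv; simp [hkx, Ne.symm hx, h]
            · simp [hkx, hyv, Ne.symm hx]
        rw [List.countP_congr (fun y hy => by rw [hp y hy])]
        by_cases hlt : x < v
        · rw [if_pos hlt]
          have hc : u.countP (fun y => y == v && decide (x < v)) = u.countP (fun y => y == v) :=
            List.countP_congr (fun y hy => by simp [hlt])
          rw [hc]
          simpa [List.count] using List.count_eq_one_of_mem hun hvu
        · rw [if_neg hlt]
          simp [hlt]
      simp [inc, h1, ih hun hvu, List.countP_cons]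
      by_cases hlt : x < v <;> simp [hlt] <;> push_cast <;> ring

-- range-index fold over ds = structural fold over the suffix of ds
theorem fold_pyRange_drop (ds : List Int) {β : Type} (g : β → Int → β) (k : Nat) (hk : k ≤ ds.length) (d : β) :
    (PySem.List.pyRange (k : Int) (ds.length : Int)).foldl (fun d j => g d (PySem.List.pyGetD ds j 0)) d
      = (ds.drop k).foldl g d := by
  induction hd : ds.length - k generalizing k d with
  | zero =>
    have hle : ds.length ≤ k := by omega
    have h1 : PySem.List.pyRange (k : Int) (ds.length : Int) = [] := by
      simp [PySem.List.pyRange]; omega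
    simp [h1, List.drop_eq_nil_of_le hle]
  | succ m ih =>
    have hlt : k < ds.length := by omega
    rw [PySem.List.pyRange_one_cons (by exact_mod_cast hlt)]
    have hget : PySem.List.pyGetD ds (k : Int) 0 = ds[k] := by
      rw [PySem.List.pyGetD_eq_getElem ds 0 (by positivity) (by exact_mod_cast hlt)]
      simp
    have hcast : ((k : Int) + 1) = ((k + 1 : Nat) : Int) := by push_cast; ring
    rw [List.foldl_cons, hget, hcast, ih (k + 1) (by omega) _ (by omega),
      List.drop_eq_getElem_cons hlt, List.foldl_cons]

-- A's nested loops with A's literal body, on the suffixes of ds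
theorem outer_fold_pairs (ds : List Int) (hn : ds.Nodup) (k : Nat) (hk : k ≤ ds.length) (d : PySem.Dict Int Int) :
    (PySem.List.pyRange (k : Int) (ds.length : Int)).foldl (fun d i =>
      (PySem.List.pyRange (i+1) (ds.length : Int)).foldl (fun d side_idx =>
        if PySem.List.pyGetD ds i 0 < PySem.List.pyGetD ds side_idx 0 then
          d.modify (PySem.List.pyGetD ds side_idx 0) 0 (· + 1)
        else if PySem.List.pyGetD ds i 0 = PySem.List.pyGetD ds side_idx 0 then
          d
        else
          d.modify (PySem.List.pyGetD ds i 0) 0 (· + 1)) d) d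
      = pairsFold (ds.drop k) d := by
  induction hd : ds.length - k generalizing k d with
  | zero =>
    have hle : ds.length ≤ k := by omega
    have h1 : PySem.List.pyRange (k : Int) (ds.length : Int) = [] := by
      simp [PySem.List.pyRange]; omega
    simp [h1, List.drop_eq_nil_of_le hle, pairsFold]
  | succ m ih =>
    have hlt : k < ds.length := by omega
    rw [PySem.List.pyRange_one_cons (by exact_mod_cast hlt)]
    have hget : PySem.List.pyGetD ds (k : Int) 0 = ds[k] := by
      rw [PySem.List.pyGetD_eq_getElem ds 0 (by positivity) (by exact_mod_cast hlt)]
      simp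
    have hcast : ((k : Int) + 1) = ((k + 1 : Nat) : Int) := by push_cast; ring
    rw [List.foldl_cons, hget, hcast,
      ih (k + 1) (by omega) _ (by omega),
      List.drop_eq_getElem_cons hlt, pairsFold]
    congr 1
    have hndrop : (ds.drop k).Nodup := hn.drop
    rw [List.drop_eq_getElem_cons hlt] at hndrop
    have hnotmem := (List.nodup_cons.mp hndrop).1
    refine (fold_pyRange_drop ds (fun d y =>
        if ds[k] < y then d.modify y 0 (· + 1)
        else if ds[k] = y then d else d.modify ds[k] 0 (· + 1)) (k+1) (by omega) d).trans ?_
    refine PySem.List.foldl_congr_mem _ _ _ _ (fun acc y hy => ?_)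
    have hne : ds[k] ≠ y := fun h => hnotmem (h ▸ hy)
    by_cases hlt2 : ds[k] < y
    · simp [hlt2, keyOf]
    · simp [hlt2, hne, keyOf]

-- ===== B-side lemmas =====
theorem rank_get?_not_mem (s : List Int) (k : Int) (d : PySem.Dict Int Int) (v : Int) (hv : v ∉ s) :
    ((PySem.List.enumerate s k).foldl (fun d p => d.insert p.2 p.1) d).get? v = d.get? v := by
  induction s generalizing k d with
  | nil => rfl
  | cons x u ih =>
    have hx : v ≠ x := fun h => hv (h ▸ List.mem_cons_self)
    have hu : v ∉ u := fun h => hv (List.mem_cons_of_mem _ h)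
    show ((PySem.List.enumerate u (k+1)).foldl (fun d p => d.insert p.2 p.1) (d.insert x k)).get? v
      = d.get? v
    rw [ih (k+1) _ hu, PySem.Dict.get?_insert_of_ne d k hx]

theorem rank_getD (s : List Int) (k : Int) (d : PySem.Dict Int Int) (v : Int) (hv : v ∈ s) (hn : s.Nodup) :
    ((PySem.List.enumerate s k).foldl (fun d p => d.insert p.2 p.1) d).getD v 0
      = k + (s.idxOf v : Int) := by
  induction s generalizing k d with
  | nil => cases hv
  | cons x u ih =>
    rcases List.nodup_cons.mp hn with ⟨hxu, hun⟩
    show ((PySem.List.enumerate u (k+1)).foldl (fun d p => d.insert p.2 p.1) (d.insert x k)).getD v 0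
      = k + ((x :: u).idxOf v : Int)
    by_cases hx : v = x
    · subst hx
      rw [PySem.Dict.getD, rank_get?_not_mem u (k+1) _ v hxu,
        PySem.Dict.get?_insert_self, List.idxOf_cons_self]
      simp
    · have hvu : v ∈ u := by
        rcases List.mem_cons.mp hv with h | h
        · exact absurd h hx
        · exact h
      rw [ih (k+1) _ hvu hun, List.idxOf_cons_ne u (Ne.symm hx)]
      push_cast
      ring

theorem idxOf_sorted_count (s : List Int) (hp : s.Pairwise (· < ·)) (v : Int) (hv : v ∈ s) :
    s.idxOf v = s.countP (fun y => decide (y < v)) := by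
  induction s with
  | nil => cases hv
  | cons x u ih =>
    rcases List.pairwise_cons.mp hp with ⟨hall, hpu⟩
    by_cases hx : v = x
    · subst hx
      rw [List.idxOf_cons_self, List.countP_cons]
      have h0 : u.countP (fun y => decide (y < v)) = 0 :=
        List.countP_eq_zero.mpr (fun y hy => by simp [not_lt.mpr (le_of_lt (hall y hy))])
      simp [h0]
    · have hvu : v ∈ u := by
        rcases List.mem_cons.mp hv with h | h
        · exact absurd h hx
        · exact h
      rw [List.idxOf_cons_ne u (Ne.symm hx), List.countP_cons, ih hpu hvu]
      simp [hall v hvu]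

-- ===== characterizations of the two ports =====
theorem alt_characterization (num_num : Int) (num_list : List Int) :
    comp_coordinates_alt num_num num_list
      = (PySem.Set.ofList num_list).map
          (fun v => (v, ((PySem.Set.ofList num_list).countP (fun y => decide (y < v)) : Int))) := by
  simp only [comp_coordinates_alt, PySem.List.dedup_eq_ofList]
  refine List.map_congr_left (fun v hv => ?_)
  have hperm := PySem.List.sorted_perm (PySem.Set.ofList num_list) (fun x : Int => x) false
  have hvs : v ∈ PySem.List.sorted (PySem.Set.ofList num_list) (fun x : Int => x) :=
    (PySem.List.mem_sorted _ _ _ v).mpr hv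
  have hns : (PySem.List.sorted (PySem.Set.ofList num_list) (fun x : Int => x)).Nodup :=
    hperm.nodup_iff.mpr (PySem.Set.nodup_ofList num_list)
  rw [rank_getD _ 0 _ v hvs hns,
    idxOf_sorted_count _ (PySem.List.sorted_ofList_pairwise_lt num_list) v hvs,
    hperm.countP_eq]
  simp

theorem init_dict (t : List Int) (d : PySem.Dict Int Int)
    (hd : ∀ i ∈ t, d.contains i = false) (hn : t.Nodup) :
    t.foldl (fun d i => d.insert i 0) d = ⟨d.items ++ t.map (fun v => (v, (0 : Int)))⟩ := by
  induction t generalizing d with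
  | nil => simp
  | cons x u ih =>
    rcases List.nodup_cons.mp hn with ⟨hxu, hun⟩
    have hx : d.contains x = false := hd x (by simp)
    have hins : d.insert x 0 = ⟨d.items ++ [(x, (0 : Int))]⟩ := by
      unfold PySem.Dict.insert
      rw [hx]
      simp
    rw [List.foldl_cons, hins, ih _ (fun i hi => ?_) hun]
    · simp
    · have hne : i ≠ x := fun h => hxu (h ▸ hi)
      have hdi : d.contains i = false := hd i (by simp [hi])
      simp only [PySem.Dict.contains] at hdi ⊢
      simp [hdi, Ne.symm hne]

theorem a_characterization (num_num : Int) (num_list : List Int) :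
    comp_coordinates num_num num_list
      = (PySem.Set.ofList num_list).map
          (fun v => (v, ((PySem.Set.ofList num_list).countP (fun y => decide (y < v)) : Int))) := by
  have hn := PySem.Set.nodup_ofList num_list
  have hinit : make_num_dict num_list = dictOf (PySem.Set.ofList num_list) (fun _ => 0) := by
    unfold make_num_dict
    rw [init_dict _ PySem.Dict.empty (fun i _ => rfl) hn]
    rfl
  show ((PySem.List.pyRange 0 ((PySem.Set.ofList num_list).length : Int)).foldl _
      (make_num_dict num_list)).items = _
  rw [hinit]
  have houter := outer_fold_pairs (PySem.Set.ofList num_list) hn 0 (by omega)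
    (dictOf (PySem.Set.ofList num_list) (fun _ => 0))
  rw [Nat.cast_zero] at houter
  rw [houter, List.drop_zero, pairsFold_dictOf _ _ _ (fun y hy => hy)]
  show List.map _ _ = _
  refine List.map_congr_left (fun v hv => ?_)
  simp [inc_count _ hn v hv]

-- ===== VERDICT (by name: the statement is the Claim_ definition above) =====
theorem comp_coordinates_spec : Claim_equal_comp_coordinates := by
  intro num_num num_list _
  unfold Spec_comp_coordinates
  rw [a_characterization, alt_characterization]
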